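-- pv_equiv track=rewrite | github.com/eightnoteight/compro | spoj/coins.py | dollars
-- ===== SOURCE A (Python) =====
-- def dollars(c, d={}):
--     try:
--         return d[c]
--     except:
--         pass
--     if c < 12:
--         return c
--     ans = max(c, dollars(c // 2, d) + dollars(c // 3, d) + dollars(c // 4, d))
--     d[c] = ans
--     return ans
-- ===== SOURCE B (Python) =====
-- def dollars(c, d={}):
--     # Bottom-up DP: collect the reachable states >= 12 not already memoised,
--     # then fill the memo in ascending order.  Same shared default dict as A.
--     if c < 12:
--         return c
--
--     def collect(x, seen):
--         if x < 12 or x in seen or x in d: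
--             return seen
--         seen.add(x)
--         collect(x // 2, seen)
--         collect(x // 3, seen)
--         collect(x // 4, seen)
--         return seen
--
--     def v(y):
--         return y if y < 12 else d[y]
--
--     for x in sorted(collect(c, set())):
--         d[x] = max(x, v(x // 2) + v(x // 3) + v(x // 4))
--     return d[c]
-- ===== Notes on version B (the rewrite author's own statement) =====
-- stated objective: alternative
-- what changed: A's top-down memoised recursion (try d[c] / recurse / store) is replaced by a two-phase bottom-up DP: first collect the set of reachable states >= 12 not yet memoised, then fill the memo for those states in ascending order and read off d[c].
import Mathlib
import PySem

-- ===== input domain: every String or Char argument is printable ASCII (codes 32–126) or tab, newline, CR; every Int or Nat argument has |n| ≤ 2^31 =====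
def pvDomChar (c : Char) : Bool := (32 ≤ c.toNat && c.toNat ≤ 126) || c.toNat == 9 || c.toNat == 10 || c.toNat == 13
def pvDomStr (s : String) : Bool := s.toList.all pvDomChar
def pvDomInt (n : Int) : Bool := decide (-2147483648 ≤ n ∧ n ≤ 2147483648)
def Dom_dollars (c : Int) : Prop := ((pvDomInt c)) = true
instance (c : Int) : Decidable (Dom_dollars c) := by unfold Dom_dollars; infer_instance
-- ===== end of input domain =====

-- B replaces A's memoised recursion by a two-phase bottom-up DP (collect reachable states, fill in
-- ascending order); equivalence is about the RETURN value only (Python A also mutates its shared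
-- default-dict memo `d`, which B fills with the same correct values in a different order).

-- termination helper, cited by the ports' decreasing_by
lemma pv_fd_toNat_lt (x k : Int) (hx : ¬ x < 12) (hk : 2 ≤ k) :
    (PySem.Int.floordiv x k).toNat < x.toNat := by
  rw [PySem.Int.floordiv_eq_ediv_of_pos (by omega)]
  have h : x / k < x := by rw [Int.ediv_lt_iff_lt_mul (by omega)]; nlinarith
  have h2 : 0 ≤ x / k := Int.ediv_nonneg (by omega) (by omega)
  omega

-- ===== PORT A =====
-- `try: return d[c] except: pass` = the `some` branch of `d.get? c`; the shared default dict is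
-- modelled as a memo threaded through the recursion, starting empty at each top-level call.
def dollarsGo (c : Int) (d : PySem.Dict Int Int) : Int × PySem.Dict Int Int :=
  match d.get? c with
  | some v => (v, d)
  | none =>
    if hc : c < 12 then (c, d)
    else
      let r2 := dollarsGo (PySem.Int.floordiv c 2) d
      let r3 := dollarsGo (PySem.Int.floordiv c 3) r2.2
      let r4 := dollarsGo (PySem.Int.floordiv c 4) r3.2
      let ans := max c (r2.1 + r3.1 + r4.1)
      (ans, r4.2.insert c ans)
termination_by c.toNat
decreasing_by all_goals exact pv_fd_toNat_lt _ _ hc (by omega)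

def dollars (c : Int) : Int := (dollarsGo c PySem.Dict.empty).1

-- ===== PORT B =====
-- phase 1: collect all states ≥ 12 reachable via //2, //3, //4 that are not memoised yet
def collectB (x : Int) (d : PySem.Dict Int Int) (seen : PySem.Set Int) : PySem.Set Int :=
  if hg : x < 12 ∨ PySem.Set.contains seen x = true ∨ d.contains x = true then seen
  else
    let s1 := PySem.Set.add seen x
    let s2 := collectB (PySem.Int.floordiv x 2) d s1
    let s3 := collectB (PySem.Int.floordiv x 3) d s2
    collectB (PySem.Int.floordiv x 4) d s3
termination_by x.toNat
decreasing_by all_goals exact pv_fd_toNat_lt _ _ (by rw [not_or] at hg; exact hg.1) (by omega)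

-- `v(y) = y if y < 12 else d[y]`; the key is always present where B calls it (KeyError
-- unreachable, established by the DP invariant below), so `d[y]` is ported as getD with 0.
def vB (d : PySem.Dict Int Int) (y : Int) : Int :=
  if y < 12 then y else d.getD y 0

-- phase 2: `for x in sorted(states): d[x] = max(x, v(x//2)+v(x//3)+v(x//4))`
def fillB (xs : List Int) (d : PySem.Dict Int Int) : PySem.Dict Int Int :=
  xs.foldl (fun d x =>
    d.insert x (max x (vB d (PySem.Int.floordiv x 2) + vB d (PySem.Int.floordiv x 3) +
      vB d (PySem.Int.floordiv x 4)))) d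

def dollars_alt (c : Int) : Int :=
  if c < 12 then c
  else
    let d0 : PySem.Dict Int Int := PySem.Dict.empty
    let states := collectB c d0 PySem.Set.empty
    let d := fillB (PySem.List.sorted states (fun x => x) false) d0
    d.getD c 0

-- ===== PRECONDITION & SPEC =====
def Spec_dollars (c : Int) (out : Int) : Prop := out = dollars_alt c
instance (c : Int) (out : Int) : Decidable (Spec_dollars c out) := by unfold Spec_dollars; infer_instance

-- ===== CLAIM (what is proved, stated in full; the proofs are below) =====
def Claim_equal_dollars : Prop := ∀ (c : Int), Dom_dollars c → Spec_dollars c (dollars c)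

-- ===== LEMMAS AND PROOFS =====

-- the common mathematical value: the naive recursion both programs compute
def gfun (x : Int) : Int :=
  if hx : x < 12 then x
  else max x (gfun (PySem.Int.floordiv x 2) + gfun (PySem.Int.floordiv x 3) +
    gfun (PySem.Int.floordiv x 4))
termination_by x.toNat
decreasing_by all_goals exact pv_fd_toNat_lt _ _ hx (by omega)

lemma pv_fd_bounds (x k : Int) (hx : ¬ x < 12) (hk : 2 ≤ k) :
    0 ≤ PySem.Int.floordiv x k ∧ PySem.Int.floordiv x k < x := by
  rw [PySem.Int.floordiv_eq_ediv_of_pos (by omega)]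
  have h : x / k < x := by rw [Int.ediv_lt_iff_lt_mul (by omega)]; nlinarith
  exact ⟨Int.ediv_nonneg (by omega) (by omega), h⟩

-- every value stored in the memo is the gfun value of its key
def GoodD (d : PySem.Dict Int Int) : Prop := ∀ k w, d.get? k = some w → w = gfun k

lemma dollarsGo_spec : ∀ (n : Nat) (c : Int) (d : PySem.Dict Int Int), c.toNat ≤ n → GoodD d →
    (dollarsGo c d).1 = gfun c ∧ GoodD (dollarsGo c d).2 := by
  intro n
  induction n with
  | zero =>
    intro c d hc hd
    rw [dollarsGo]
    cases hg : d.get? c with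
    | some v => exact ⟨hd c v hg, by simpa [hg] using hd⟩
    | none =>
      have hlt : c < 12 := by omega
      simp only [hlt, dif_pos]
      exact ⟨by rw [gfun, dif_pos hlt], hd⟩
  | succ m ih =>
    intro c d hc hd
    rw [dollarsGo]
    cases hg : d.get? c with
    | some v => exact ⟨hd c v hg, by simpa [hg] using hd⟩
    | none =>
      by_cases hlt : c < 12
      · simp only [hlt, dif_pos]
        exact ⟨by rw [gfun, dif_pos hlt], hd⟩
      · simp only [hlt, dif_neg, not_false_iff]
        have hb2 := pv_fd_toNat_lt c 2 hlt (by omega)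
        have hb3 := pv_fd_toNat_lt c 3 hlt (by omega)
        have hb4 := pv_fd_toNat_lt c 4 hlt (by omega)
        obtain ⟨e2, g2⟩ := ih (PySem.Int.floordiv c 2) d (by omega) hd
        obtain ⟨e3, g3⟩ := ih (PySem.Int.floordiv c 3) _ (by omega) g2
        obtain ⟨e4, g4⟩ := ih (PySem.Int.floordiv c 4) _ (by omega) g3
        constructor
        · simp only [e2, e3, e4]
          conv_rhs => rw [gfun]
          rw [dif_neg hlt]
        · intro k w hk
          rcases eq_or_ne k c with rfl | hne
          · rw [PySem.Dict.get?_insert_self] at hk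
            cases hk
            simp only [e2, e3, e4]
            conv_rhs => rw [gfun]
            rw [dif_neg hlt]
          · rw [PySem.Dict.get?_insert_of_ne _ _ hne] at hk
            exact g4 k w hk

lemma collectB_subset : ∀ (n : Nat) (x : Int) (d : PySem.Dict Int Int) (seen : PySem.Set Int),
    x.toNat ≤ n → ∀ y ∈ seen, y ∈ collectB x d seen := by
  intro n
  induction n with
  | zero =>
    intro x d seen hx y hy
    rw [collectB, dif_pos (by omega)]
    exact hy
  | succ m ih =>
    intro x d seen hx y hy
    rw [collectB]
    by_cases hg : x < 12 ∨ PySem.Set.contains seen x = true ∨ d.contains x = true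
    · rw [dif_pos hg]; exact hy
    · rw [dif_neg hg]
      rw [not_or] at hg
      have hb2 := pv_fd_toNat_lt x 2 hg.1 (by omega)
      have hb3 := pv_fd_toNat_lt x 3 hg.1 (by omega)
      have hb4 := pv_fd_toNat_lt x 4 hg.1 (by omega)
      refine ih _ _ _ (by omega) y (ih _ _ _ (by omega) y (ih _ _ _ (by omega) y ?_))
      rw [PySem.Set.mem_add]
      exact Or.inl hy

lemma collectB_subset' (x : Int) (d : PySem.Dict Int Int) (seen : PySem.Set Int) :
    ∀ y ∈ seen, y ∈ collectB x d seen :=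
  collectB_subset x.toNat x d seen le_rfl

lemma collectB_self (x : Int) (d : PySem.Dict Int Int) (seen : PySem.Set Int)
    (h12 : ¬ x < 12) (hd : d.contains x = false) : x ∈ collectB x d seen := by
  rw [collectB]
  by_cases hg : x < 12 ∨ PySem.Set.contains seen x = true ∨ d.contains x = true
  · rw [dif_pos hg]
    rcases hg with h | h | h
    · exact absurd h h12
    · exact (PySem.Set.contains_iff seen x).1 h
    · rw [hd] at h; cases h
  · rw [dif_neg hg]
    refine collectB_subset' _ _ _ x (collectB_subset' _ _ _ x (collectB_subset' _ _ _ x ?_))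
    rw [PySem.Set.mem_add]
    exact Or.inr rfl

lemma collectB_nodup : ∀ (n : Nat) (x : Int) (d : PySem.Dict Int Int) (seen : PySem.Set Int),
    x.toNat ≤ n → seen.Nodup → (collectB x d seen).Nodup := by
  intro n
  induction n with
  | zero =>
    intro x d seen hx hs
    rw [collectB, dif_pos (by omega)]
    exact hs
  | succ m ih =>
    intro x d seen hx hs
    rw [collectB]
    by_cases hg : x < 12 ∨ PySem.Set.contains seen x = true ∨ d.contains x = true
    · rw [dif_pos hg]; exact hs
    · rw [dif_neg hg]
      rw [not_or] at hg
      have hb2 := pv_fd_toNat_lt x 2 hg.1 (by omega)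
      have hb3 := pv_fd_toNat_lt x 3 hg.1 (by omega)
      have hb4 := pv_fd_toNat_lt x 4 hg.1 (by omega)
      exact ih _ _ _ (by omega) (ih _ _ _ (by omega) (ih _ _ _ (by omega)
        (PySem.Set.nodup_add seen x hs)))

lemma collectB_closed : ∀ (n : Nat) (x : Int) (d : PySem.Dict Int Int) (seen : PySem.Set Int),
    x.toNat ≤ n → ∀ y ∈ collectB x d seen, y ∈ seen ∨
      (12 ≤ y ∧ d.contains y = false ∧ ∀ k : Int, k = 2 ∨ k = 3 ∨ k = 4 →
        (PySem.Int.floordiv y k < 12 ∨ d.contains (PySem.Int.floordiv y k) = true ∨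
          PySem.Int.floordiv y k ∈ collectB x d seen)) := by
  intro n
  induction n with
  | zero =>
    intro x d seen hx y hy
    rw [collectB, dif_pos (by omega)] at hy ⊢
    exact Or.inl hy
  | succ m ih =>
    intro x d seen hx y hy
    by_cases hg : x < 12 ∨ PySem.Set.contains seen x = true ∨ d.contains x = true
    · rw [collectB, dif_pos hg] at hy
      exact Or.inl hy
    · have hS : collectB x d seen =
          collectB (PySem.Int.floordiv x 4) d
            (collectB (PySem.Int.floordiv x 3) d
              (collectB (PySem.Int.floordiv x 2) d (PySem.Set.add seen x))) := by
        rw [collectB, dif_neg hg]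
      rw [not_or, not_or] at hg
      obtain ⟨h12, hseen, hdx⟩ := hg
      have hb2 := pv_fd_toNat_lt x 2 h12 (by omega)
      have hb3 := pv_fd_toNat_lt x 3 h12 (by omega)
      have hb4 := pv_fd_toNat_lt x 4 h12 (by omega)
      -- names for the intermediate sets
      set s1 := PySem.Set.add seen x with hs1
      set s2 := collectB (PySem.Int.floordiv x 2) d s1 with hs2
      set s3 := collectB (PySem.Int.floordiv x 3) d s2 with hs3
      have hsub23 : ∀ z ∈ s2, z ∈ s3 := collectB_subset' _ _ _
      have hsub3S : ∀ z ∈ s3, z ∈ collectB x d seen := by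
        rw [hS]; exact collectB_subset' _ _ _
      have hsub2S : ∀ z ∈ s2, z ∈ collectB x d seen := fun z hz => hsub3S z (hsub23 z hz)
      rw [hS] at hy
      rcases ih _ _ _ (by omega) y hy with hy3 | ⟨ha, hb, hc⟩
      · rcases ih _ _ _ (by omega) y hy3 with hy2 | ⟨ha, hb, hc⟩
        · rcases ih _ _ _ (by omega) y hy2 with hy1 | ⟨ha, hb, hc⟩
          · rw [hs1, PySem.Set.mem_add] at hy1
            rcases hy1 with hy0 | rfl
            · exact Or.inl hy0
            · -- y = x : closure for x itself
              refine Or.inr ⟨by omega, by simpa using hdx, ?_⟩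
              intro k hk
              by_cases hlt : PySem.Int.floordiv y k < 12
              · exact Or.inl hlt
              · by_cases hdk : d.contains (PySem.Int.floordiv y k) = true
                · exact Or.inr (Or.inl hdk)
                · refine Or.inr (Or.inr ?_)
                  have hdk' : d.contains (PySem.Int.floordiv y k) = false := by
                    simpa using hdk
                  rcases hk with rfl | rfl | rfl
                  · exact hsub2S _ (collectB_self _ _ _ hlt hdk')
                  · exact hsub3S _ (collectB_self _ _ _ hlt hdk')
                  · rw [hS]; exact collectB_self _ _ _ hlt hdk'
          · -- closure w.r.t. s2, lift to S
            refine Or.inr ⟨ha, hb, ?_⟩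
            intro k hk
            rcases hc k hk with h | h | h
            · exact Or.inl h
            · exact Or.inr (Or.inl h)
            · exact Or.inr (Or.inr (hsub2S _ h))
        · refine Or.inr ⟨ha, hb, ?_⟩
          intro k hk
          rcases hc k hk with h | h | h
          · exact Or.inl h
          · exact Or.inr (Or.inl h)
          · exact Or.inr (Or.inr (hsub3S _ h))
      · refine Or.inr ⟨ha, hb, ?_⟩
        intro k hk
        rcases hc k hk with h | h | h
        · exact Or.inl h
        · exact Or.inr (Or.inl h)
        · rw [hS]; exact Or.inr (Or.inr h)







lemma fillB_get?_of_not_mem (xs : List Int) : ∀ (d : PySem.Dict Int Int) (z : Int), z ∉ xs →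
    (fillB xs d).get? z = d.get? z := by
  induction xs with
  | nil => intro d z _; rfl
  | cons y t ih =>
    intro d z hz
    rw [List.mem_cons, not_or] at hz
    show (fillB t _).get? z = _
    rw [ih _ z hz.2, PySem.Dict.get?_insert_of_ne _ _ hz.1]

lemma fillB_spec : ∀ (xs : List Int) (d : PySem.Dict Int Int),
    xs.Pairwise (· < ·) →
    (∀ y ∈ xs, 12 ≤ y ∧ ∀ k : Int, k = 2 ∨ k = 3 ∨ k = 4 →
      (PySem.Int.floordiv y k < 12 ∨
        d.get? (PySem.Int.floordiv y k) = some (gfun (PySem.Int.floordiv y k)) ∨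
        PySem.Int.floordiv y k ∈ xs)) →
    GoodD d →
    GoodD (fillB xs d) ∧ ∀ y ∈ xs, (fillB xs d).get? y = some (gfun y) := by
  intro xs
  induction xs with
  | nil => intro d _ _ hd; exact ⟨hd, by simp⟩
  | cons y t ih =>
    intro d hp hyp hd
    rw [List.pairwise_cons] at hp
    obtain ⟨hylt, hpt⟩ := hp
    have hy := hyp y (List.mem_cons_self)
    have h12y : 12 ≤ y := hy.1
    -- each child's memo value is its gfun value
    have hchild : ∀ k : Int, k = 2 ∨ k = 3 ∨ k = 4 →
        vB d (PySem.Int.floordiv y k) = gfun (PySem.Int.floordiv y k) := by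
      intro k hk
      have hklo : (2:Int) ≤ k := by rcases hk with rfl | rfl | rfl <;> omega
      have hb := pv_fd_bounds y k (by omega) hklo
      by_cases hlt : PySem.Int.floordiv y k < 12
      · rw [vB, if_pos hlt, gfun, dif_pos hlt]
      · rcases hy.2 k hk with h | h | h
        · exact absurd h hlt
        · rw [vB, if_neg hlt, PySem.Dict.getD_of_get?_eq_some _ _ h]
        · exfalso
          rcases List.mem_cons.1 h with he | ht
          · omega
          · have := hylt _ ht; omega
    have hval : max y (vB d (PySem.Int.floordiv y 2) + vB d (PySem.Int.floordiv y 3) +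
        vB d (PySem.Int.floordiv y 4)) = gfun y := by
      rw [hchild 2 (by tauto), hchild 3 (by tauto), hchild 4 (by tauto)]
      conv_rhs => rw [gfun]
      rw [dif_neg (by omega : ¬ y < 12)]
    set d' := d.insert y (max y (vB d (PySem.Int.floordiv y 2) + vB d (PySem.Int.floordiv y 3) +
        vB d (PySem.Int.floordiv y 4))) with hd'
    have hgood' : GoodD d' := by
      intro k w hk
      rcases eq_or_ne k y with rfl | hne
      · rw [hd', PySem.Dict.get?_insert_self] at hk
        cases hk; exact hval
      · rw [hd', PySem.Dict.get?_insert_of_ne _ _ hne] at hk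
        exact hd k w hk
    have hget'y : d'.get? y = some (gfun y) := by
      rw [hd', PySem.Dict.get?_insert_self, hval]
    have hyp' : ∀ y' ∈ t, 12 ≤ y' ∧ ∀ k : Int, k = 2 ∨ k = 3 ∨ k = 4 →
        (PySem.Int.floordiv y' k < 12 ∨
          d'.get? (PySem.Int.floordiv y' k) = some (gfun (PySem.Int.floordiv y' k)) ∨
          PySem.Int.floordiv y' k ∈ t) := by
      intro y' hy'
      have h := hyp y' (List.mem_cons_of_mem _ hy')
      refine ⟨h.1, ?_⟩
      intro k hk
      rcases h.2 k hk with hc | hc | hc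
      · exact Or.inl hc
      · refine Or.inr (Or.inl ?_)
        rcases eq_or_ne (PySem.Int.floordiv y' k) y with he | hne
        · rw [he]; exact hget'y
        · rw [hd', PySem.Dict.get?_insert_of_ne _ _ hne]; exact hc
      · rcases List.mem_cons.1 hc with he | ht
        · rw [he]; exact Or.inr (Or.inl hget'y)
        · exact Or.inr (Or.inr ht)
    obtain ⟨hgood, hget⟩ := ih d' hpt hyp' hgood'
    refine ⟨hgood, ?_⟩
    intro z hz
    rcases List.mem_cons.1 hz with rfl | hzt
    · have hznt : z ∉ t := fun hin => absurd (hylt _ hin) (lt_irrefl z)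
      show (fillB t d').get? z = _
      rw [fillB_get?_of_not_mem t d' z hznt, hget'y]
    · exact hget z hzt

lemma dollars_eq_gfun (c : Int) : dollars c = gfun c := by
  have := dollarsGo_spec c.toNat c PySem.Dict.empty le_rfl
    (by intro k w h; simp [PySem.Dict.get?_empty] at h)
  exact this.1

lemma pv_set_empty_nodup : (PySem.Set.empty (α := Int)).Nodup := List.nodup_nil

lemma dollars_alt_eq_gfun (c : Int) : dollars_alt c = gfun c := by
  by_cases hlt : c < 12
  · rw [dollars_alt, if_pos hlt, gfun, dif_pos hlt]
  · rw [dollars_alt, if_neg hlt]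
    set d0 : PySem.Dict Int Int := PySem.Dict.empty with hd0
    set S := collectB c d0 PySem.Set.empty with hS
    set ys := PySem.List.sorted S (fun x => x) false with hys
    have hmem : ∀ y, y ∈ ys ↔ y ∈ S := fun y => PySem.List.mem_sorted S (fun x => x) false y
    have hnodS : S.Nodup := collectB_nodup c.toNat c d0 PySem.Set.empty le_rfl pv_set_empty_nodup
    have hperm : ys.Perm S := PySem.List.sorted_perm S (fun x => x) false
    have hnys : ys.Nodup := (hperm.nodup_iff).2 hnodS
    have hle : ys.Pairwise (fun a b => a ≤ b) := PySem.List.sorted_pairwise S (fun x => x)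
    have hplt : ys.Pairwise (· < ·) :=
      (hle.and hnys).imp (fun h => lt_of_le_of_ne h.1 h.2)
    have hcS : c ∈ S := collectB_self c d0 PySem.Set.empty hlt (PySem.Dict.contains_empty c)
    have hyp : ∀ y ∈ ys, 12 ≤ y ∧ ∀ k : Int, k = 2 ∨ k = 3 ∨ k = 4 →
        (PySem.Int.floordiv y k < 12 ∨
          d0.get? (PySem.Int.floordiv y k) = some (gfun (PySem.Int.floordiv y k)) ∨
          PySem.Int.floordiv y k ∈ ys) := by
      intro y hy
      rcases collectB_closed c.toNat c d0 PySem.Set.empty le_rfl y ((hmem y).1 hy) with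
        h0 | ⟨h12, _, hcl⟩
      · cases h0
      · refine ⟨h12, ?_⟩
        intro k hk
        rcases hcl k hk with h | h | h
        · exact Or.inl h
        · rw [hd0, PySem.Dict.contains_empty] at h; cases h
        · exact Or.inr (Or.inr ((hmem _).2 h))
    have hgood0 : GoodD d0 := by
      intro k w h
      rw [hd0, PySem.Dict.get?_empty] at h; cases h
    obtain ⟨_, hget⟩ := fillB_spec ys d0 hplt hyp hgood0
    exact PySem.Dict.getD_of_get?_eq_some _ _ (hget c ((hmem c).2 hcS))

-- ===== VERDICT (by name: the statement is the Claim_ definition above) =====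
theorem dollars_spec : Claim_equal_dollars := by
  intro c _
  unfold Spec_dollars
  rw [dollars_eq_gfun, dollars_alt_eq_gfun]
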